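-- pv_equiv track=rewrite | github.com/Lumia-Xiao/PCBAuto1 | core/routing.py | _line_cells
-- ===== SOURCE A (Python) =====
-- from typing import Dict, List, Optional, Set, Tuple
--
-- def _line_cells(a: Tuple[int, int], b: Tuple[int, int]) -> List[Tuple[int, int]]:
--     x1, y1 = a
--     x2, y2 = b
--     if x1 == x2:
--         step = 1 if y2 >= y1 else -1
--         return [(x1, y) for y in range(y1, y2 + step, step)]
--     if y1 == y2:
--         step = 1 if x2 >= x1 else -1
--         return [(x, y1) for x in range(x1, x2 + step, step)]
--     return []
-- ===== SOURCE B (Python) =====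
-- def _line_cells(a, b):
--     x1, y1 = a
--     x2, y2 = b
--     if x1 != x2 and y1 != y2:
--         return []
--     # walk backward from b toward a, collecting cells, then reverse
--     sx = (x2 > x1) - (x2 < x1)
--     sy = (y2 > y1) - (y2 < y1)
--     rev = []
--     x, y = x2, y2
--     while (x, y) != (x1, y1):
--         rev.append((x, y))
--         x -= sx
--         y -= sy
--     rev.append((x1, y1))
--     rev.reverse()
--     return rev
-- ===== Notes on version B (the rewrite author's own statement) =====
-- stated objective: alternative
-- what changed: Replaces A's two per-axis range comprehensions with a single backward walk: an explicit while loop stepping from b toward a, building the cell list back-to-front into an accumulator and reversing it once at the end.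
import Mathlib
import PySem

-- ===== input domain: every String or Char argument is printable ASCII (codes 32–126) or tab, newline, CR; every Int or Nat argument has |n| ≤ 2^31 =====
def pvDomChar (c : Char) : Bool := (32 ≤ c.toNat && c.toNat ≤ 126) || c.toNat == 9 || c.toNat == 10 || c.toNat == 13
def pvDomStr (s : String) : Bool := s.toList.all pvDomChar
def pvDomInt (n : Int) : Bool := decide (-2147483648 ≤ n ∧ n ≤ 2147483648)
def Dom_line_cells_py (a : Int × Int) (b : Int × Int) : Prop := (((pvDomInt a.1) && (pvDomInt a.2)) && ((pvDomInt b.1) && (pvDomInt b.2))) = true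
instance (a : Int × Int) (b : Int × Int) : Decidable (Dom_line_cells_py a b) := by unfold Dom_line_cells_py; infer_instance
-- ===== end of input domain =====

-- B replaces A's two per-axis forward range comprehensions by a backward walk from b toward a
-- that builds the list back-to-front and reverses once (objective: alternative decomposition).

-- ===== PORT A =====
def line_cells_py (a : Int × Int) (b : Int × Int) : List (Int × Int) :=
  let x1 := a.1; let y1 := a.2
  let x2 := b.1; let y2 := b.2
  if x1 = x2 then
    let step : Int := if y2 ≥ y1 then 1 else -1
    (PySem.List.pyRange y1 (y2 + step) step).map (fun y => (x1, y))
  else if y1 = y2 then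
    let step : Int := if x2 ≥ x1 then 1 else -1
    (PySem.List.pyRange x1 (x2 + step) step).map (fun x => (x, y1))
  else []

-- ===== PORT B =====
-- the Python while loop 'while (x, y) != (x1, y1): rev.append((x, y)); x -= sx; y -= sy';
-- the Nat fuel (Manhattan distance + 1, always sufficient on the guarded calls) only makes
-- the recursion total, it changes no computed value.
def bWalk (x1 y1 sx sy : Int) : Nat → Int → Int → List (Int × Int) → List (Int × Int)
  | 0, _, _, acc => acc
  | fuel + 1, x, y, acc =>
    if x = x1 ∧ y = y1 then acc
    else bWalk x1 y1 sx sy fuel (x - sx) (y - sy) (acc ++ [(x, y)])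

def line_cells_py_alt (a : Int × Int) (b : Int × Int) : List (Int × Int) :=
  let x1 := a.1; let y1 := a.2
  let x2 := b.1; let y2 := b.2
  if x1 ≠ x2 ∧ y1 ≠ y2 then []
  else
    let sx : Int := (if x2 > x1 then 1 else 0) - (if x2 < x1 then 1 else 0)
    let sy : Int := (if y2 > y1 then 1 else 0) - (if y2 < y1 then 1 else 0)
    let rev := bWalk x1 y1 sx sy ((x2 - x1).natAbs + (y2 - y1).natAbs + 1) x2 y2 []
    (rev ++ [(x1, y1)]).reverse

-- ===== PRECONDITION & SPEC =====
def Spec_line_cells_py (a : Int × Int) (b : Int × Int) (out : List (Int × Int)) : Prop := out = line_cells_py_alt a b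
instance (a : Int × Int) (b : Int × Int) (out : List (Int × Int)) : Decidable (Spec_line_cells_py a b out) := by unfold Spec_line_cells_py; infer_instance

-- ===== CLAIM (what is proved, stated in full; the proofs are below) =====
def Claim_equal_line_cells_py : Prop := ∀ (a : Int × Int) (b : Int × Int), Dom_line_cells_py a b → Spec_line_cells_py a b (line_cells_py a b)

-- ===== LEMMAS AND PROOFS =====

-- the backward walk, started k steps away from (x1, y1), appends the k visited points in
-- walking (descending-index) order
theorem bWalk_eq (x1 y1 sx sy : Int) (h : sx ≠ 0 ∨ sy ≠ 0) :
    ∀ (k f : Nat) (acc : List (Int × Int)),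
    bWalk x1 y1 sx sy (k + f + 1) (x1 + sx * k) (y1 + sy * k) acc
      = acc ++ (List.range k).map (fun i => (x1 + sx * ((k - i : Nat) : Int), y1 + sy * ((k - i : Nat) : Int))) := by
  intro k
  induction k with
  | zero => intro f acc; simp [bWalk]
  | succ k ih =>
    intro f acc
    have hne : ¬ (x1 + sx * ((k + 1 : Nat) : Int) = x1 ∧ y1 + sy * ((k + 1 : Nat) : Int) = y1) := by
      rcases h with h | h
      · intro ⟨h1, _⟩
        have : sx * ((k + 1 : Nat) : Int) = 0 := by omega
        rcases mul_eq_zero.mp this with h' | h'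
        · exact h h'
        · have : ((k + 1 : Nat) : Int) = 0 := h'
          omega
      · intro ⟨_, h2⟩
        have : sy * ((k + 1 : Nat) : Int) = 0 := by omega
        rcases mul_eq_zero.mp this with h' | h'
        · exact h h'
        · have : ((k + 1 : Nat) : Int) = 0 := h'
          omega
    have hfuel : (k + 1) + f + 1 = (k + f + 1) + 1 := by omega
    rw [hfuel]
    show (if x1 + sx * ((k + 1 : Nat) : Int) = x1 ∧ y1 + sy * ((k + 1 : Nat) : Int) = y1 then acc
        else bWalk x1 y1 sx sy (k + f + 1) (x1 + sx * ((k + 1 : Nat) : Int) - sx)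
          (y1 + sy * ((k + 1 : Nat) : Int) - sy) (acc ++ [(x1 + sx * ((k + 1 : Nat) : Int), y1 + sy * ((k + 1 : Nat) : Int))])) = _
    rw [if_neg hne]
    have hx : x1 + sx * ((k + 1 : Nat) : Int) - sx = x1 + sx * (k : Nat) := by push_cast; ring
    have hy : y1 + sy * ((k + 1 : Nat) : Int) - sy = y1 + sy * (k : Nat) := by push_cast; ring
    rw [hx, hy, ih f]
    rw [List.range_succ_eq_map, List.map_cons, List.map_map]
    simp only [Nat.sub_zero, List.append_assoc, List.cons_append, List.nil_append]
    congr 2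
    apply List.map_congr_left
    intro i hi
    simp only [Function.comp_apply]
    congr 2 <;> · congr 1; omega

-- the whole backward walk plus final append and reverse equals the forward enumeration
theorem walk_result (x1 y1 sx sy : Int) (n : Nat) (h : n ≠ 0 → sx ≠ 0 ∨ sy ≠ 0) :
    (bWalk x1 y1 sx sy (n + 1) (x1 + sx * n) (y1 + sy * n) [] ++ [(x1, y1)]).reverse
      = (List.range (n + 1)).map (fun (i : Nat) => (x1 + sx * (i : Int), y1 + sy * (i : Int))) := by
  cases n with
  | zero => simp [bWalk]
  | succ m =>
    have h' := bWalk_eq x1 y1 sx sy (h (Nat.succ_ne_zero m)) (m + 1) 0 []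
    rw [show (m + 1) + 0 + 1 = (m + 1) + 1 from rfl] at h'
    rw [h']
    apply List.ext_getElem
    · simp
    · intro j h1 h2
      simp only [List.length_reverse, List.length_append, List.length_map, List.length_range,
        List.nil_append, List.length_singleton] at h1
      simp only [List.length_map, List.length_range] at h2
      rw [List.getElem_reverse]
      simp only [List.nil_append, List.length_append, List.length_map, List.length_range,
        List.getElem_map, List.getElem_range]
      by_cases hj : j = 0
      · subst hj
        rw [List.getElem_append_right (by simp)]
        simp
      · rw [List.getElem_append_left (by simp; omega)]
        simp only [List.getElem_map, List.getElem_range, List.length_singleton, Prod.mk.injEq]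
        constructor <;> · congr 2; · congr 1; omega

-- ===== VERDICT (by name: the statement is the Claim_ definition above) =====
theorem line_cells_py_spec : Claim_equal_line_cells_py := by
  intro a b _
  obtain ⟨x1, y1⟩ := a
  obtain ⟨x2, y2⟩ := b
  unfold Spec_line_cells_py line_cells_py line_cells_py_alt
  by_cases hx : x1 = x2
  · subst hx
    by_cases hy : y1 = y2
    · -- single point
      subst hy
      simp [bWalk, PySem.List.pyRange_one_singleton]
    · rcases lt_or_gt_of_ne hy with h | h
      · -- vertical, ascending
        have hcast : (((y2 - y1).natAbs : Nat) : Int) = y2 - y1 := Int.natAbs_of_nonneg (by omega)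
        have hB := walk_result x1 y1 0 1 ((y2 - y1).natAbs) (fun _ => Or.inr one_ne_zero)
        rw [show x1 + (0 : Int) * (((y2 - y1).natAbs : Nat) : Int) = x1 from by ring,
            show y1 + (1 : Int) * (((y2 - y1).natAbs : Nat) : Int) = y2 from by rw [one_mul, hcast]; ring] at hB
        simp only [ite_true, ne_eq, not_true_eq_false, false_and, if_false,
          gt_iff_lt, lt_irrefl, if_pos h, if_neg (not_lt.mpr h.le), sub_self, Int.natAbs_zero,
          Nat.zero_add, sub_zero, ge_iff_le, if_pos h.le]
        rw [hB, PySem.List.pyRange_one, List.map_map,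
          show (y2 + 1 - y1).toNat = (y2 - y1).natAbs + 1 from by omega]
        apply List.map_congr_left
        intro i _
        simp only [Function.comp_apply, Prod.mk.injEq]
        constructor <;> ring
      · -- vertical, descending
        have hcast : (((y2 - y1).natAbs : Nat) : Int) = y1 - y2 := by
          rw [show y2 - y1 = -(y1 - y2) from by ring, Int.natAbs_neg]
          exact Int.natAbs_of_nonneg (by omega)
        have hB := walk_result x1 y1 0 (-1) ((y2 - y1).natAbs) (fun _ => Or.inr (by norm_num))
        rw [show x1 + (0 : Int) * (((y2 - y1).natAbs : Nat) : Int) = x1 from by ring,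
            show y1 + (-1 : Int) * (((y2 - y1).natAbs : Nat) : Int) = y2 from by rw [hcast]; ring] at hB
        simp only [ite_true, ne_eq, not_true_eq_false, false_and, if_false,
          gt_iff_lt, lt_irrefl, if_neg (not_lt.mpr h.le), if_pos h, sub_self, Int.natAbs_zero,
          Nat.zero_add, zero_sub, ge_iff_le, if_neg (not_le.mpr h)]
        rw [hB, PySem.List.pyRange_neg_one, List.map_map,
          show (y1 - (y2 + -1)).toNat = (y2 - y1).natAbs + 1 from by omega]
        apply List.map_congr_left
        intro i _
        simp only [Function.comp_apply, Prod.mk.injEq]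
        constructor <;> ring
  · rw [if_neg hx]
    by_cases hy : y1 = y2
    · subst hy
      rw [if_pos rfl]
      rcases lt_or_gt_of_ne hx with h | h
      · -- horizontal, ascending
        have hcast : (((x2 - x1).natAbs : Nat) : Int) = x2 - x1 := Int.natAbs_of_nonneg (by omega)
        have hB := walk_result x1 y1 1 0 ((x2 - x1).natAbs) (fun _ => Or.inl one_ne_zero)
        rw [show x1 + (1 : Int) * (((x2 - x1).natAbs : Nat) : Int) = x2 from by rw [one_mul, hcast]; ring,
            show y1 + (0 : Int) * (((x2 - x1).natAbs : Nat) : Int) = y1 from by ring] at hB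
        simp only [ne_eq, not_true_eq_false, and_false, if_false, gt_iff_lt, lt_irrefl,
          if_pos h, if_neg (not_lt.mpr h.le), sub_self, Int.natAbs_zero, Nat.add_zero,
          sub_zero, ge_iff_le, if_pos h.le]
        rw [hB, PySem.List.pyRange_one, List.map_map,
          show (x2 + 1 - x1).toNat = (x2 - x1).natAbs + 1 from by omega]
        apply List.map_congr_left
        intro i _
        simp only [Function.comp_apply, Prod.mk.injEq]
        constructor <;> ring
      · -- horizontal, descending
        have hcast : (((x2 - x1).natAbs : Nat) : Int) = x1 - x2 := by
          rw [show x2 - x1 = -(x1 - x2) from by ring, Int.natAbs_neg]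
          exact Int.natAbs_of_nonneg (by omega)
        have hB := walk_result x1 y1 (-1) 0 ((x2 - x1).natAbs) (fun _ => Or.inl (by norm_num))
        rw [show x1 + (-1 : Int) * (((x2 - x1).natAbs : Nat) : Int) = x2 from by rw [hcast]; ring,
            show y1 + (0 : Int) * (((x2 - x1).natAbs : Nat) : Int) = y1 from by ring] at hB
        simp only [ne_eq, not_true_eq_false, and_false, if_false, gt_iff_lt, lt_irrefl,
          if_neg (not_lt.mpr h.le), if_pos h, sub_self, Int.natAbs_zero, Nat.add_zero,
          zero_sub, ge_iff_le, if_neg (not_le.mpr h)]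
        rw [hB, PySem.List.pyRange_neg_one, List.map_map,
          show (x1 - (x2 + -1)).toNat = (x2 - x1).natAbs + 1 from by omega]
        apply List.map_congr_left
        intro i _
        simp only [Function.comp_apply, Prod.mk.injEq]
        constructor <;> ring
    · rw [if_neg hy, if_pos ⟨hx, hy⟩]
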